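-- pv_equiv track=rewrite | github.com/basusaptarshi89/data_structure_with_python | leetcode/trap_rain_water.py | get_max_right_boundary_height_arr
-- ===== SOURCE A (Python) =====
-- def get_max_right_boundary_height_arr(A):
-- 	max_right_bound_height = []
-- 	max_height = 0
-- 	for i, h in enumerate(A):
-- 		if i == (len(A) - 1):
-- 			max_right_bound_height.append(0)
-- 		else:
-- 			max_right_bound_height.append(max(A[i+1:]))
-- 	return max_right_bound_height
-- ===== SOURCE B (Python) =====
-- def get_max_right_boundary_height_arr(A):
-- 	# Single right-to-left pass keeping the running maximum of the elements
-- 	# already seen (i.e. those to the right in the original order).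
-- 	res = []
-- 	m = None
-- 	for h in reversed(A):
-- 		res.append(0 if m is None else m)
-- 		m = h if m is None else max(m, h)
-- 	res.reverse()
-- 	return res
-- ===== Notes on version B (the rewrite author's own statement) =====
-- stated objective: faster
-- what changed: Replaces the per-index max over the remaining slice A[i+1:] with a single right-to-left pass that maintains the running maximum of the elements already visited.
import Mathlib
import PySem

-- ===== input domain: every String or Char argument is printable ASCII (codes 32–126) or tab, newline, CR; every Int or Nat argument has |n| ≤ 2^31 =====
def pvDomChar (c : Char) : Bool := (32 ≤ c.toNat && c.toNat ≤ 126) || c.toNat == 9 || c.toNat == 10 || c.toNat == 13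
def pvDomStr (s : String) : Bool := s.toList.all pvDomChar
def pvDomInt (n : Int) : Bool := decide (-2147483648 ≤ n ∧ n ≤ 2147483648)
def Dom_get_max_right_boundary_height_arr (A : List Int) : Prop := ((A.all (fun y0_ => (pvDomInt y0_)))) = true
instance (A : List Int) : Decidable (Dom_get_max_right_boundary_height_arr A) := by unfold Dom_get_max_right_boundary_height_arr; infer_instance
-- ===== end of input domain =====

-- B replaces A's quadratic per-index max over the slice A[i+1:] with one
-- right-to-left pass maintaining a running maximum (objective: faster, O(n)).

-- ===== PORT A =====
-- For i < len(A)-1 the slice A[i+1:] is nonempty, so Python's max never raises;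
-- `.getD 0` on that branch is therefore never the default.
def get_max_right_boundary_height_arr (A : List Int) : List Int :=
  (PySem.List.enumerate A 0).foldl
    (fun acc p =>
      if p.1 = (A.length : Int) - 1 then acc ++ [0]
      else acc ++ [(PySem.List.max? (PySem.List.slice A (some (p.1 + 1)) none) (fun y => y)).getD 0])
    []

-- ===== PORT B =====
def get_max_right_boundary_height_arr_alt (A : List Int) : List Int :=
  let st := A.reverse.foldl
    (fun (st : List Int × Option Int) h =>
      (st.1 ++ [st.2.getD 0],
       some (match st.2 with | none => h | some m => max m h)))
    ([], none)
  st.1.reverse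

-- ===== PRECONDITION & SPEC =====
def Spec_get_max_right_boundary_height_arr (A : List Int) (out : List Int) : Prop := out = get_max_right_boundary_height_arr_alt A
instance (A : List Int) (out : List Int) : Decidable (Spec_get_max_right_boundary_height_arr A out) := by unfold Spec_get_max_right_boundary_height_arr; infer_instance

-- ===== CLAIM (what is proved, stated in full; the proofs are below) =====
def Claim_equal_get_max_right_boundary_height_arr : Prop := ∀ (A : List Int), Dom_get_max_right_boundary_height_arr A → Spec_get_max_right_boundary_height_arr A (get_max_right_boundary_height_arr A)

-- ===== LEMMAS AND PROOFS =====

-- the step function of B's running-maximum state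
def pvStep (m : Option Int) (h : Int) : Option Int :=
  some (match m with | none => h | some v => max v h)

lemma pvStep_some (v h : Int) : pvStep (some v) h = some (max v h) := rfl

lemma foldl_max_pull (tt : List Int) (a b : Int) :
    tt.foldl max (max a b) = max (tt.foldl max a) b := by
  induction tt generalizing a with
  | nil => rfl
  | cons c t ih =>
    simp only [List.foldl_cons]
    rw [show max (max a b) c = max (max a c) b by
          rw [max_assoc, max_comm b c, ← max_assoc], ih]

-- the second component of B's fold ignores the first
lemma foldB_snd (l : List Int) (r : List Int) (m : Option Int) :
    (l.foldl (fun (st : List Int × Option Int) h =>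
        (st.1 ++ [st.2.getD 0],
         some (match st.2 with | none => h | some m => max m h))) (r, m)).2
      = l.foldl pvStep m := by
  induction l generalizing r m with
  | nil => rfl
  | cons x t ih => simpa [pvStep] using ih _ _

-- the running max collected right-to-left is Python's max of the list
lemma foldl_pvStep_reverse (xs : List Int) :
    xs.reverse.foldl pvStep none = PySem.List.max? xs (fun y => y) := by
  induction xs with
  | nil => rfl
  | cons x t ih =>
    rw [List.reverse_cons, List.foldl_append, ih]
    cases t with
    | nil => rfl
    | cons y tt =>
      rw [PySem.List.max?_id_cons, List.foldl_cons, List.foldl_nil, pvStep_some,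
          PySem.List.max?_id_cons, List.foldl_cons]
      rw [max_comm x y, foldl_max_pull]

-- B's cons equation
lemma alt_cons (x : Int) (xs : List Int) :
    get_max_right_boundary_height_arr_alt (x :: xs)
      = (PySem.List.max? xs (fun y => y)).getD 0 :: get_max_right_boundary_height_arr_alt xs := by
  unfold get_max_right_boundary_height_arr_alt
  simp only [List.reverse_cons, List.foldl_append, List.foldl_cons, List.foldl_nil]
  rw [foldB_snd, foldl_pvStep_reverse]
  simp

-- A's fold as a map
lemma a_eq_map (A : List Int) :
    get_max_right_boundary_height_arr A
      = (PySem.List.enumerate A 0).map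
          (fun p => if p.1 = (A.length : Int) - 1 then 0
            else (PySem.List.max? (PySem.List.slice A (some (p.1 + 1)) none) (fun y => y)).getD 0) := by
  unfold get_max_right_boundary_height_arr
  have hf : (fun (acc : List Int) (p : Int × Int) =>
      if p.1 = (A.length : Int) - 1 then acc ++ [0]
      else acc ++ [(PySem.List.max? (PySem.List.slice A (some (p.1 + 1)) none) (fun y => y)).getD 0])
    = (fun (acc : List Int) (p : Int × Int) =>
        acc ++ [if p.1 = (A.length : Int) - 1 then 0
          else (PySem.List.max? (PySem.List.slice A (some (p.1 + 1)) none) (fun y => y)).getD 0]) := by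
    funext acc p; split <;> rfl
  rw [hf, PySem.List.foldl_append_singleton_eq_map, List.nil_append]

-- A's cons equation
lemma a_cons (x : Int) (xs : List Int) :
    get_max_right_boundary_height_arr (x :: xs)
      = (PySem.List.max? xs (fun y => y)).getD 0 :: get_max_right_boundary_height_arr xs := by
  rw [a_eq_map, a_eq_map, PySem.List.enumerate_cons, List.map_cons]
  congr 1
  · -- head entry
    cases xs with
    | nil => rfl
    | cons y t =>
      have hne : ¬ ((0 : Int) = ((x :: y :: t).length : Int) - 1) := by
        simp only [List.length_cons]; push_cast; omega
      rw [if_neg hne, zero_add, PySem.List.slice_from_one]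
      rfl
  · -- tail: compare entrywise
    apply List.ext_getElem?
    intro k
    rcases Nat.lt_or_ge k xs.length with hk | hk
    · rw [List.getElem?_map, List.getElem?_map,
         PySem.List.getElem?_enumerate, PySem.List.getElem?_enumerate,
         List.getElem?_eq_getElem hk, Option.map_some, Option.map_some,
         Option.map_some, Option.map_some]
      congr 1
      simp only [zero_add]
      have hcond : ((1 + (k : Int)) = ((x :: xs).length : Int) - 1) ↔ ((k : Int) = (xs.length : Int) - 1) := by
        simp only [List.length_cons]; push_cast; omega
      by_cases hc : (k : Int) = (xs.length : Int) - 1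
      · rw [if_pos (hcond.mpr hc), if_pos hc]
      · rw [if_neg (fun h => hc (hcond.mp h)), if_neg hc]
        have e1 : PySem.List.slice (x :: xs) (some (1 + (k : Int) + 1)) none
            = PySem.List.slice xs (some ((k : Int) + 1)) none := by
          rw [PySem.List.slice_from _ (by omega), PySem.List.slice_from _ (by omega)]
          have h2 : (1 + (k : Int) + 1).toNat = ((k : Int) + 1).toNat + 1 := by omega
          rw [h2, List.drop_succ_cons]
        rw [e1]
    · rw [List.getElem?_map, List.getElem?_map,
         PySem.List.getElem?_enumerate, PySem.List.getElem?_enumerate,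
         List.getElem?_eq_none (by simpa using hk)]
      rfl

lemma ports_agree (A : List Int) :
    get_max_right_boundary_height_arr A = get_max_right_boundary_height_arr_alt A := by
  induction A with
  | nil => rfl
  | cons x xs ih => rw [a_cons, alt_cons, ih]

-- ===== VERDICT (by name: the statement is the Claim_ definition above) =====
theorem get_max_right_boundary_height_arr_spec : Claim_equal_get_max_right_boundary_height_arr := by
  intro A _
  exact ports_agree A
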